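-- pv_equiv track=rewrite | github.com/lagoueduCol/Algorithm-Dryad | 14.DP/1349.参加考试的最大学生数.py | isValidSit
-- ===== SOURCE A (Python) =====
-- def isValidSit(j):
--     pre_bit = 0
--     while j:
--         cur_bit = j & 0x01
--         if cur_bit and pre_bit:
--             return False
--         j >>= 1
--         pre_bit = cur_bit
--     return True
-- ===== SOURCE B (Python) =====
-- def isValidSit(j):
--     return (j & (j >> 1)) == 0
-- ===== Notes on version B (the rewrite author's own statement) =====
-- stated objective: idiomatic
-- what changed: Replaces the bit-by-bit while loop carrying a pre_bit accumulator with the single closed-form adjacency test (j & (j >> 1)) == 0.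
import Mathlib
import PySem

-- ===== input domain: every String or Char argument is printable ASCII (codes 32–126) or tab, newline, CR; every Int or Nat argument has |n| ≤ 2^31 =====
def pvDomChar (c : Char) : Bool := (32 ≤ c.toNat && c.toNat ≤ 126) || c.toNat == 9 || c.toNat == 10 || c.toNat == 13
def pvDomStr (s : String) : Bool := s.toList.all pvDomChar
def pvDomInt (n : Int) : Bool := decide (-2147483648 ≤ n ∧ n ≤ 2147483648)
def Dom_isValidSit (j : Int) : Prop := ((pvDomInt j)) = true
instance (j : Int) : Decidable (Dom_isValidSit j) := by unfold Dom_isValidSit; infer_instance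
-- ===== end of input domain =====

-- B replaces A's bit-by-bit while loop (pre_bit accumulator) with the closed-form
-- adjacency test (j & (j >> 1)) == 0; the two agree on every int (on negative j the
-- sign bits are all ones, so both return False).


-- ===== PORT A =====
-- The while loop, step for step: `while j:` exits on j = 0; cur_bit = j & 1;
-- `if cur_bit and pre_bit: return False`; j >>= 1; pre_bit = cur_bit.
-- The fuel parameter is only a totality guard; the loop terminates on every int
-- (positive j shrinks, negative j climbs to -1 whose bits ...111 trigger the
-- adjacent-bits exit), and the supplied fuel is proved sufficient below.
def isValidSitGo : Nat → Int → Int → Bool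
  | 0, _, _ => true
  | fuel + 1, j, pre_bit =>
    if j = 0 then true
    else
      let cur_bit := Int.land j 1
      if cur_bit ≠ 0 ∧ pre_bit ≠ 0 then false
      else isValidSitGo fuel (Int.shiftRight j 1) cur_bit

def isValidSit (j : Int) : Bool := isValidSitGo (2 * j.natAbs + 2) j 0

-- ===== PORT B =====
-- Source B: return (j & (j >> 1)) == 0.  Int.land / Int.shiftRight are Python's
-- two's-complement & and arithmetic >>.
def isValidSit_alt (j : Int) : Bool := Int.land j (Int.shiftRight j 1) == 0

-- ===== PRECONDITION & SPEC =====
def Spec_isValidSit (j : Int) (out : Bool) : Prop := out = isValidSit_alt j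
instance (j : Int) (out : Bool) : Decidable (Spec_isValidSit j out) := by unfold Spec_isValidSit; infer_instance

-- ===== CLAIM (what is proved, stated in full; the proofs are below) =====
def Claim_equal_isValidSit : Prop := ∀ (j : Int), Dom_isValidSit j → Spec_isValidSit j (isValidSit j)

-- ===== LEMMAS AND PROOFS =====

theorem sr1 (j : Int) : Int.shiftRight j 1 = j / 2 := by
  have h : j >>> (1 : ℕ) = j / ((2 ^ 1 : ℕ) : Int) := Int.shiftRight_eq_div_pow j 1
  norm_num at h
  exact h

theorem land_neg_one_one : Int.land (-1 : Int) 1 = 1 := by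
  show Int.land (Int.negSucc 0) (Int.ofNat 1) = 1
  rw [Int.land]
  norm_num [Nat.ldiff, Nat.bitwise]

theorem and_eq_zero_iff_testBit (a b : Nat) :
    a &&& b = 0 ↔ ∀ i, ¬(a.testBit i ∧ b.testBit i) := by
  constructor
  · intro h i hi
    have := congrArg (Nat.testBit · i) h
    simp [Nat.testBit_and, Nat.zero_testBit, hi.1, hi.2] at this
  · intro h
    apply Nat.eq_of_testBit_eq
    intro i
    have := h i
    simp [Nat.testBit_and, Nat.zero_testBit]
    intro ha
    by_contra hb
    exact this ⟨ha, by simpa using hb⟩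

theorem and_one_eq_zero_iff (a : Nat) : a &&& 1 = 0 ↔ a.testBit 0 = false := by
  simp [Nat.and_one_is_mod, Nat.testBit_zero]

theorem nat_key (a : Nat) :
    a &&& (a >>> 1) = 0 ↔
      ((a >>> 1) &&& ((a >>> 1) >>> 1) = 0 ∧ (a &&& 1 = 0 ∨ (a >>> 1) &&& 1 = 0)) := by
  rw [and_one_eq_zero_iff, and_one_eq_zero_iff, and_eq_zero_iff_testBit, and_eq_zero_iff_testBit]
  simp only [Nat.testBit_shiftRight]
  constructor
  · intro h
    refine ⟨fun i hi => h (1 + i) hi, ?_⟩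
    by_cases h0 : a.testBit 0 = true
    · right
      by_contra h1
      simp only [Bool.not_eq_false] at h1
      exact h 0 ⟨h0, h1⟩
    · left
      simpa using h0
  · rintro ⟨h1, h2⟩ i hi
    cases i with
    | zero =>
      rcases h2 with h0 | h0
      · exact absurd hi.1 (by simp [h0])
      · exact absurd hi.2 (by simp [h0])
    | succ m =>
      apply h1 m
      refine ⟨by rw [Nat.add_comm]; exact hi.1, ?_⟩
      rw [show 1 + (1 + m) = 1 + (m + 1) by omega]
      exact hi.2

theorem land_natCast (a b : Nat) : Int.land (a : Int) (b : Int) = ((a &&& b : Nat) : Int) := rfl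

theorem land_one_natCast (a : Nat) : Int.land (a : Int) 1 = ((a &&& 1 : Nat) : Int) := rfl

theorem shiftRight_natCast (a : Nat) : Int.shiftRight (a : Int) 1 = ((a >>> 1 : Nat) : Int) := rfl

theorem natCast_beq_zero (x : Nat) : (((x : Int)) == 0) = (x == 0) := by
  simp

-- on nonnegative j (and enough fuel) the loop computes the closed form,
-- corrected by pre_bit on the first step
theorem go_pos : ∀ (fuel : Nat) (j pre : Int), 0 ≤ j → j.toNat < fuel →
    isValidSitGo fuel j pre =
      ((Int.land j (Int.shiftRight j 1) == 0) && (pre == 0 || Int.land j 1 == 0)) := by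
  intro fuel
  induction fuel with
  | zero => intro j pre hj hf; omega
  | succ fuel ih =>
    intro j pre hj hf
    obtain ⟨a, rfl⟩ : ∃ a : Nat, j = (a : Int) := ⟨j.toNat, by omega⟩
    rw [isValidSitGo]
    by_cases h0 : (a : Int) = 0
    · have : a = 0 := by omega
      subst this
      simp only [if_pos h0, land_natCast, shiftRight_natCast, natCast_beq_zero]
      simp only [Bool.true_eq, Bool.and_eq_true, Bool.or_eq_true]
      exact ⟨by simp, Or.inr (by simp [beq_iff_eq]; rfl)⟩
    · simp only [if_neg h0]
      have hlt : ((Int.shiftRight (a : Int) 1)).toNat < fuel := by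
        rw [sr1]
        omega
      split_ifs with hc
      · obtain ⟨hcur, hpre⟩ := hc
        have hcur' : ¬(a &&& 1 = 0) := by
          intro h
          exact hcur (by rw [land_one_natCast, h]; rfl)
        simp only [land_natCast, land_one_natCast, shiftRight_natCast, natCast_beq_zero]
        have e1 := Nat.and_one_is_mod a
        simp [hpre]
        intro _
        omega
      · rw [ih _ _ (by rw [sr1]; omega) hlt, shiftRight_natCast, land_one_natCast]
        simp only [land_natCast, land_one_natCast, shiftRight_natCast, natCast_beq_zero]
        have key := nat_key a
        have e1 := Nat.and_one_is_mod a
        have e2 := Nat.and_one_is_mod (a >>> 1)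
        by_cases hcur : a &&& 1 = 0
        · by_cases hm : (a >>> 1) &&& ((a >>> 1) >>> 1) = 0
          · have c1 : a % 2 = 0 := by omega
            simp [c1, hm, key.mpr ⟨hm, Or.inl hcur⟩]
          · have hA : ¬(a &&& (a >>> 1) = 0) := fun h => hm (key.mp h).1
            have c1 : a % 2 = 0 := by omega
            simp [c1, hm, hA]
        · have hpre : pre = 0 := by
            by_contra hp
            exact hc ⟨fun h => hcur (by
              have : ((a &&& 1 : Nat) : Int) = 0 := by rw [← land_one_natCast]; exact h
              exact_mod_cast this), hp⟩
          subst hpre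
          by_cases hm : (a >>> 1) &&& ((a >>> 1) >>> 1) = 0
          · by_cases hm1 : (a >>> 1) &&& 1 = 0
            · have c1 : a % 2 = 1 := by omega
              have c2 : (a >>> 1) % 2 = 0 := by omega
              simp [c1, c2, hm, key.mpr ⟨hm, Or.inr hm1⟩]
            · have hA : ¬(a &&& (a >>> 1) = 0) := fun h =>
                (key.mp h).2.elim (fun h => hcur h) (fun h => hm1 h)
              have c1 : a % 2 = 1 := by omega
              have c2 : (a >>> 1) % 2 = 1 := by omega
              simp [c1, c2, hA]
          · have hA : ¬(a &&& (a >>> 1) = 0) := fun h => hm (key.mp h).1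
            have bx : (((a >>> 1) &&& ((a >>> 1) >>> 1)) == 0) = false := by simp [hm]
            have bY : ((a &&& (a >>> 1)) == 0) = false := by simp [hA]
            rw [bx, bY]
            simp

-- on negative j (and enough fuel) the loop always ends in the adjacent-bits exit
theorem go_neg : ∀ (fuel : Nat) (j pre : Int), j < 0 →
    2 * (j + 1).natAbs + (if pre = 0 then 1 else 0) + 1 ≤ fuel →
    isValidSitGo fuel j pre = false := by
  intro fuel
  induction fuel with
  | zero => intro j pre hj hf; omega
  | succ fuel ih =>
    intro j pre hj hf
    rw [isValidSitGo]
    have hz : ¬ j = 0 := by omega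
    simp only [if_neg hz]
    split_ifs with hc
    · rfl
    · by_cases hj1 : j = -1
      · subst hj1
        have hpre : pre = 0 := by
          by_contra hp
          exact hc ⟨by rw [land_neg_one_one]; norm_num, hp⟩
        subst hpre
        have hsr : Int.shiftRight (-1 : Int) 1 = -1 := by rw [sr1]; norm_num
        rw [land_neg_one_one, hsr]
        apply ih (-1) 1 (by norm_num)
        simp only [if_pos] at hf ⊢
        norm_num
        omega
      · have hsr := sr1 j
        apply ih _ _ (by omega)
        rw [hsr]
        split_ifs at hf ⊢ <;> omega

-- on negative j the closed form is a bitwise and of two negatives, hence nonzero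
theorem alt_neg (j : Int) (hj : j < 0) : isValidSit_alt j = false := by
  obtain ⟨m, rfl⟩ : ∃ m : Nat, j = Int.negSucc m := by
    refine ⟨(-(j + 1)).toNat, ?_⟩
    rw [Int.negSucc_eq]
    omega
  unfold isValidSit_alt
  have h1 : Int.shiftRight (Int.negSucc m) 1 = Int.negSucc (m >>> 1) := rfl
  have h2 : Int.land (Int.negSucc m) (Int.negSucc (m >>> 1)) = Int.negSucc (m ||| (m >>> 1)) := rfl
  rw [h1, h2]
  simp

-- ===== VERDICT (by name: the statement is the Claim_ definition above) =====
theorem isValidSit_spec : Claim_equal_isValidSit := by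
  intro j _
  unfold Spec_isValidSit isValidSit
  by_cases hj : 0 ≤ j
  · rw [go_pos (2 * j.natAbs + 2) j 0 hj (by omega)]
    unfold isValidSit_alt
    simp
  · rw [go_neg (2 * j.natAbs + 2) j 0 (by omega) (by split_ifs <;> omega),
      alt_neg j (by omega)]
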